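-- pv_equiv track=rewrite | github.com/JJK96/dotfiles | python_bin/html_table_cut.py | expand_columns
-- ===== SOURCE A (Python) =====
-- def expand_columns(columns):
--     if ',' in columns:
--         res = []
--         for c in columns.split(','):
--             res += expand_columns(c)
--         return res
--     if '-' in columns:
--         start,_,end = columns.partition('-')
--         return list(range(int(start),int(end)+1))
--     return [int(columns)]
-- ===== SOURCE B (Python) =====
-- def expand_columns(columns):
--     res = []
--     for piece in columns.split(','):
--         if '-' in piece:
--             start, _, end = piece.partition('-')
--             res.extend(range(int(start), int(end) + 1))
--         else:
--             res.append(int(piece))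
--     return res
-- ===== Notes on version B (the rewrite author's own statement) =====
-- stated objective: simpler
-- what changed: Replaced A's recursion (re-calling itself on every comma piece) by a single non-recursive loop over columns.split(',') that handles each piece's dash/single case directly, accumulating into one result list.
import Mathlib
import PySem

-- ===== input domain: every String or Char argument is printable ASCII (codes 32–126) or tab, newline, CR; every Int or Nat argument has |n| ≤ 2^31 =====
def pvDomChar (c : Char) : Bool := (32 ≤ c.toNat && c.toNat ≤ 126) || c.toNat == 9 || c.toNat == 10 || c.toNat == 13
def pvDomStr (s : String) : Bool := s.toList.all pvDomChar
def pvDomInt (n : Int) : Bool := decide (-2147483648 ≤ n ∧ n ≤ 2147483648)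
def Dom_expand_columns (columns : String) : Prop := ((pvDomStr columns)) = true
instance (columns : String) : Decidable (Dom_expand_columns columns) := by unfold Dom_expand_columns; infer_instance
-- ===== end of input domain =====

-- B replaces A's recursion over comma pieces by one non-recursive loop; objective: simpler.

-- ===== PORT A =====
-- A recurses on the pieces of columns.split(','); pieces contain no ',', so the depth is
-- at most 2. The fuel argument is only a termination guard (fuel 0 is never reached for
-- fuel ≥ length+1); the recursion itself is A's.
-- str.partition('-') is ported by hand (no PySem primitive): start = take of the first '-'
-- index, end = drop past it — exact whenever '-' is in the string, which the branch guarantees.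
-- int(s) is PySem.Int.ofChars?; where it is none Python raises ValueError (excluded by Pre_),
-- the port returns 0 there.
def expandAux (fuel : Nat) (cs : List Char) : List Int :=
  match fuel with
  | 0 => []
  | fuel + 1 =>
    if PySem.Chars.isIn [','] cs then
      (PySem.Chars.splitOn cs [',']).foldl (fun res c => res ++ expandAux fuel c) []
    else if PySem.Chars.isIn ['-'] cs then
      let i := (PySem.Chars.find cs ['-']).toNat
      PySem.List.pyRange ((PySem.Int.ofChars? (cs.take i)).getD 0)
        (((PySem.Int.ofChars? (cs.drop (i + 1))).getD 0) + 1) 1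
    else [(PySem.Int.ofChars? cs).getD 0]

def expand_columns (columns : String) : List Int :=
  expandAux (columns.toList.length + 1) columns.toList

-- ===== PORT B =====
-- Source B: one loop over columns.split(','), extending/appending into res.
-- partition('-') and int() ported exactly as on the A side.
def expand_columns_alt (columns : String) : List Int :=
  (PySem.Chars.splitOn columns.toList [',']).foldl
    (fun res piece =>
      if PySem.Chars.isIn ['-'] piece then
        let i := (PySem.Chars.find piece ['-']).toNat
        res ++ PySem.List.pyRange ((PySem.Int.ofChars? (piece.take i)).getD 0)
          (((PySem.Int.ofChars? (piece.drop (i + 1))).getD 0) + 1) 1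
      else
        res ++ [(PySem.Int.ofChars? piece).getD 0]) []

-- ===== PRECONDITION & SPEC =====
-- Pre_ excludes exactly the inputs on which Python A raises ValueError from int():
-- some comma piece whose dash-partition parts (or the piece itself, if dash-free) are
-- not valid int() literals.  B raises identically there.
def pvPieceOK (p : List Char) : Bool :=
  if PySem.Chars.isIn ['-'] p then
    (PySem.Int.ofChars? (p.take (PySem.Chars.find p ['-']).toNat)).isSome &&
    (PySem.Int.ofChars? (p.drop ((PySem.Chars.find p ['-']).toNat + 1))).isSome
  else
    (PySem.Int.ofChars? p).isSome

def Pre_expand_columns (columns : String) : Prop :=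
  ∀ p ∈ PySem.Chars.splitOn columns.toList [','], pvPieceOK p = true

instance (columns : String) : Decidable (Pre_expand_columns columns) := by
  unfold Pre_expand_columns; infer_instance

def pvWitness_expand_columns : String := "1-3,5"

def Spec_expand_columns (columns : String) (out : List Int) : Prop := out = expand_columns_alt columns
instance (columns : String) (out : List Int) : Decidable (Spec_expand_columns columns out) := by unfold Spec_expand_columns; infer_instance

-- ===== CLAIM (what is proved, stated in full; the proofs are below) =====
def Claim_equal_expand_columns : Prop := ∀ (columns : String), Dom_expand_columns columns → Pre_expand_columns columns → Spec_expand_columns columns (expand_columns columns)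

-- ===== LEMMAS AND PROOFS =====

-- the value of one comma-free piece (proof-side abbreviation of the shared dash/single handling)
def pvPieceVal (p : List Char) : List Int :=
  if PySem.Chars.isIn ['-'] p then
    PySem.List.pyRange ((PySem.Int.ofChars? (p.take (PySem.Chars.find p ['-']).toNat)).getD 0)
      (((PySem.Int.ofChars? (p.drop ((PySem.Chars.find p ['-']).toNat + 1))).getD 0) + 1) 1
  else [(PySem.Int.ofChars? p).getD 0]

-- reference split-on-one-character function
def pvSplitC (a : Char) : List Char → List (List Char)
  | [] => [[]]
  | c :: rest => if c = a then [] :: pvSplitC a rest else (pvSplitC a rest).modifyHead (c :: ·)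

theorem pvSplitC_ne_nil (a : Char) (l : List Char) : pvSplitC a l ≠ [] := by
  cases l with
  | nil => simp [pvSplitC]
  | cons c rest =>
    simp only [pvSplitC]
    split
    · simp
    · cases h : pvSplitC a rest with
      | nil => exact absurd h (pvSplitC_ne_nil a rest)
      | cons x xs => simp

theorem pvGo_eq (a : Char) (l : List Char) : ∀ (fuel : Nat), l.length < fuel →
    ∀ (cur : List Char) (acc : List (List Char)),
    PySem.Chars.splitOn.go [a] fuel l cur acc
      = acc.reverse ++ (pvSplitC a l).modifyHead (cur.reverse ++ ·) := by
  induction l with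
  | nil =>
    intro fuel hf cur acc
    cases fuel with
    | zero => omega
    | succ f => simp [PySem.Chars.splitOn.go, pvSplitC]
  | cons c rest ih =>
    intro fuel hf cur acc
    cases fuel with
    | zero => omega
    | succ f =>
      have hf' : rest.length < f := by simpa using hf
      by_cases hca : c = a
      · subst hca
        have hpre : List.isPrefixOf [c] (c :: rest) = true := by simp [List.isPrefixOf]
        rw [PySem.Chars.splitOn.go, if_pos hpre]
        simp only [List.length_cons, List.length_nil, List.drop_succ_cons, List.drop_zero]
        rw [ih f hf' [] (cur.reverse :: acc)]
        cases h : pvSplitC c rest with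
        | nil => exact absurd h (pvSplitC_ne_nil c rest)
        | cons x xs => simp [pvSplitC, h]
      · have hpre : List.isPrefixOf [a] (c :: rest) = false := by
          simp [List.isPrefixOf]
          exact fun h => absurd h.symm hca
        rw [PySem.Chars.splitOn.go, if_neg (by simp [hpre])]
        rw [ih f hf' (c :: cur) acc]
        cases h : pvSplitC a rest with
        | nil => exact absurd h (pvSplitC_ne_nil a rest)
        | cons x xs => simp [pvSplitC, h, if_neg hca]

theorem pvSplitOn_eq (a : Char) (cs : List Char) :
    PySem.Chars.splitOn cs [a] = pvSplitC a cs := by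
  show PySem.Chars.splitOn.go [a] (cs.length + 1) cs [] [] = _
  rw [pvGo_eq a cs (cs.length + 1) (by omega) [] []]
  cases h : pvSplitC a cs with
  | nil => exact absurd h (pvSplitC_ne_nil a cs)
  | cons x xs => simp

theorem pvSplitC_not_mem (a : Char) (l : List Char) :
    ∀ p ∈ pvSplitC a l, a ∉ p := by
  induction l with
  | nil => intro p hp; simp [pvSplitC] at hp; simp [hp]
  | cons c rest ih =>
    intro p hp
    simp only [pvSplitC] at hp
    by_cases hca : c = a
    · rw [if_pos hca] at hp
      rcases List.mem_cons.mp hp with rfl | hp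
      · simp
      · exact ih p hp
    · rw [if_neg hca] at hp
      cases h : pvSplitC a rest with
      | nil => exact absurd h (pvSplitC_ne_nil a rest)
      | cons x xs =>
        rw [h] at hp
        simp only [List.modifyHead, List.mem_cons] at hp
        rcases hp with rfl | hp
        · intro hmem
          rcases List.mem_cons.mp hmem with rfl | hmem
          · exact hca rfl
          · exact ih x (by simp [h]) hmem
        · exact ih p (by simp [h, hp])

theorem pvSplitC_of_not_mem (a : Char) (l : List Char) (h : a ∉ l) :
    pvSplitC a l = [l] := by
  induction l with
  | nil => rfl
  | cons c rest ih =>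
    simp only [List.mem_cons, not_or] at h
    simp [pvSplitC, if_neg (show ¬c = a from fun hh => h.1 hh.symm), ih h.2]

theorem pvIsIn_singleton_eq_false (a : Char) (l : List Char) (h : a ∉ l) :
    PySem.Chars.isIn [a] l = false := by
  rw [PySem.Chars.isIn_eq_false_iff]
  intro ⟨s, t, hst⟩
  exact h (by rw [← hst]; simp)

theorem pvIsIn_singleton_mem (a : Char) (l : List Char)
    (h : PySem.Chars.isIn [a] l = true) : a ∈ l := by
  by_contra h'
  rw [pvIsIn_singleton_eq_false a l h'] at h
  simp at h

theorem expandAux_no_comma (n : Nat) (p : List Char) (h : ',' ∉ p) :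
    expandAux (n + 1) p = pvPieceVal p := by
  simp only [expandAux, pvIsIn_singleton_eq_false ',' p h, Bool.false_eq_true, if_false,
    pvPieceVal]

-- B's fold step is "append the piece's value"
theorem alt_step (res : List Int) (p : List Char) :
    (if PySem.Chars.isIn ['-'] p then
      res ++ PySem.List.pyRange ((PySem.Int.ofChars? (p.take (PySem.Chars.find p ['-']).toNat)).getD 0)
        (((PySem.Int.ofChars? (p.drop ((PySem.Chars.find p ['-']).toNat + 1))).getD 0) + 1) 1
    else res ++ [(PySem.Int.ofChars? p).getD 0]) = res ++ pvPieceVal p := by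
  unfold pvPieceVal
  split <;> rfl

-- ===== VERDICT (by name: the statement is the Claim_ definition above) =====
theorem expand_columns_spec : Claim_equal_expand_columns := by
  intro columns _ _
  unfold Spec_expand_columns expand_columns expand_columns_alt
  generalize columns.toList = cs
  by_cases hc : PySem.Chars.isIn [','] cs = true
  · have hmem : ',' ∈ cs := pvIsIn_singleton_mem ',' cs hc
    have hlen : 1 ≤ cs.length := List.length_pos_iff.mpr (List.ne_nil_of_mem hmem)
    obtain ⟨m, hm⟩ : ∃ m, cs.length = m + 1 := ⟨cs.length - 1, by omega⟩
    rw [show expandAux (cs.length + 1) cs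
        = (PySem.Chars.splitOn cs [',']).foldl (fun res c => res ++ expandAux cs.length c) []
      from by rw [expandAux, if_pos hc]]
    exact (PySem.List.foldl_congr_mem _ _ _ [] (fun res p hp => by
      rw [alt_step res p, hm,
        expandAux_no_comma m p (pvSplitC_not_mem ',' cs p (by rwa [← pvSplitOn_eq]))])).symm
  · have hnot : ',' ∉ cs := fun hmem => by
      obtain ⟨s, t, rfl⟩ := List.append_of_mem hmem
      exact (PySem.Chars.isIn_eq_false_iff [','] _).mp (eq_false_of_ne_true hc)
        ⟨s, t, by simp⟩
    rw [pvSplitOn_eq, pvSplitC_of_not_mem ',' cs hnot]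
    rw [show expandAux (cs.length + 1) cs = pvPieceVal cs from expandAux_no_comma cs.length cs hnot]
    simp only [List.foldl_cons, List.foldl_nil]
    rw [alt_step [] cs, List.nil_append]
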